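-- pv_equiv track=rewrite | github.com/ramnawab72/ai | p2 (Implement Recursive Best First Search Algorithm to solve given problem).py | rbfs_search
-- ===== SOURCE A (Python) =====
-- romania_map = {'Arad': {'Zerind': 75, 'Timisoara': 118, 'Sibiu': 140}, 'Zerind': {'Arad': 75, 'Oradea': 71},
--                'Timisoara': {'Arad': 118, 'Lugoj': 111}, 'Sibiu': {'Arad': 140, 'Oradea': 151, 'Fagaras': 99, 'Rimnicu Vilcea': 80},
--                'Oradea': {'Zerind': 71, 'Sibiu': 151}, 'Lugoj': {'Timisoara': 111, 'Mehadia': 70},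
--                'Fagaras': {'Sibiu': 99, 'Bucharest': 211}, 'Rimnicu Vilcea': {'Sibiu': 80, 'Craiova': 146, 'Pitesti': 97},
--                'Mehadia': {'Lugoj': 70, 'Drobeta': 75}, 'Drobeta': {'Mehadia': 75, 'Craiova': 120},
--                'Craiova': {'Drobeta': 120, 'Rimnicu Vilcea': 146, 'Pitesti': 138},
--                'Pitesti': {'Rimnicu Vilcea': 97, 'Craiova': 138, 'Bucharest': 101},
--                'Bucharest': {'Fagaras': 211, 'Pitesti': 101}}
--
-- heuristics = {'Arad': 366, 'Zerind': 374, 'Timisoara': 329, 'Sibiu': 253, 'Oradea': 380, 'Lugoj': 244,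
--                'Fagaras': 176, 'Rimnicu Vilcea': 193, 'Mehadia': 241, 'Drobeta': 242, 'Craiova': 160,
--                'Pitesti': 100, 'Bucharest': 0}
--
-- def rbfs_search(start, goal, path, f_limit):
--     if start == goal:
--         return path
--     successors = sorted(romania_map[start], key=lambda x: romania_map[start][x] + heuristics[x])
--     for city in successors:
--         new_path, f_value = path + [city], romania_map[start][city] + heuristics[city]
--         if f_value <= f_limit:
--             result = rbfs_search(city, goal, new_path, min(f_limit, f_value))
--             if result:
--                 return result
--     return None
-- ===== SOURCE B (Python) =====
-- # B: iterative explicit-stack DFS over a precomputed f-value adjacency table.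
-- # F_ADJ[city] lists (distance + heuristic, neighbour) pairs already sorted
-- # ascending; this is exactly sorted(romania_map[city], key=lambda x:
-- # romania_map[city][x] + heuristics[x]) with its f-values, computed once
-- # instead of re-sorting the fixed Romania map on every visit.
-- F_ADJ = {
--     'Arad': [(393, 'Sibiu'), (447, 'Timisoara'), (449, 'Zerind')],
--     'Zerind': [(441, 'Arad'), (451, 'Oradea')],
--     'Timisoara': [(355, 'Lugoj'), (484, 'Arad')],
--     'Sibiu': [(273, 'Rimnicu Vilcea'), (275, 'Fagaras'), (506, 'Arad'), (531, 'Oradea')],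
--     'Oradea': [(404, 'Sibiu'), (445, 'Zerind')],
--     'Lugoj': [(311, 'Mehadia'), (440, 'Timisoara')],
--     'Fagaras': [(211, 'Bucharest'), (352, 'Sibiu')],
--     'Rimnicu Vilcea': [(197, 'Pitesti'), (306, 'Craiova'), (333, 'Sibiu')],
--     'Mehadia': [(314, 'Lugoj'), (317, 'Drobeta')],
--     'Drobeta': [(280, 'Craiova'), (316, 'Mehadia')],
--     'Craiova': [(238, 'Pitesti'), (339, 'Rimnicu Vilcea'), (362, 'Drobeta')],
--     'Pitesti': [(101, 'Bucharest'), (290, 'Rimnicu Vilcea'), (298, 'Craiova')],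
--     'Bucharest': [(201, 'Pitesti'), (387, 'Fagaras')],
-- }
--
--
-- def rbfs_search(start, goal, path, f_limit):
--     # Stack of (city, path, limit) frames; eligible successors are pushed in
--     # reverse sorted order, so the best one is popped first, reproducing the
--     # recursive best-first descent iteratively.
--     stack = [(start, path, f_limit)]
--     while stack:
--         city, p, limit = stack.pop()
--         if city == goal:
--             return p
--         for f, x in reversed(F_ADJ[city]):
--             if f <= limit:
--                 stack.append((x, p + [x], min(limit, f)))
--     return None
-- ===== Notes on version B (the rewrite author's own statement) =====
-- stated objective: alternative
-- what changed: The recursive best-first descent that re-sorts romania_map[city] on every visit is replaced by an iterative depth-first search over an explicit stack of (city, path, limit) frames driven by a once-precomputed adjacency table F_ADJ that stores each city's (distance+heuristic, neighbour) pairs already sorted ascending; eligible successors are pushed in reverse order so the pop order reproduces A's recursion order exactly.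
import Mathlib
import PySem

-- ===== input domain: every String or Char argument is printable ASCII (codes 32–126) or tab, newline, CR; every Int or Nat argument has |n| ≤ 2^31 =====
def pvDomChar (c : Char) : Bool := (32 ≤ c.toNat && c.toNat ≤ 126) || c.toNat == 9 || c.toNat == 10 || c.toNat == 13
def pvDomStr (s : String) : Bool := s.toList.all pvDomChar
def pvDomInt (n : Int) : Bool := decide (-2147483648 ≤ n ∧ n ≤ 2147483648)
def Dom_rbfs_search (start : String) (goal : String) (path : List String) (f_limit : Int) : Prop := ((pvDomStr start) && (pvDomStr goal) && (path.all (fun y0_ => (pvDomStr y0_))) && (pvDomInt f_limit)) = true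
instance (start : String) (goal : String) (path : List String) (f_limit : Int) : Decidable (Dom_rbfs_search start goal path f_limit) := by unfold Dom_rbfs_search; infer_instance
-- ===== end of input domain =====

-- B replaces A's recursion (which re-sorts romania_map[city] on every visit) by an
-- iterative explicit-stack DFS over a once-precomputed sorted f-value adjacency table,
-- same return value on all non-raising inputs; objective: alternative.
-- Both ports carry a fuel counter purely as a totality guard (the recursion depth and
-- the number of pops are bounded on every input, proved below), so it never runs out.

-- ===== PORT A =====
-- shared constants of the module (the fixed Romania map and heuristics)
def pvRomania : PySem.Dict String (PySem.Dict String Int) := PySem.Dict.ofList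
  [("Arad", PySem.Dict.ofList [("Zerind", 75), ("Timisoara", 118), ("Sibiu", 140)]),
   ("Zerind", PySem.Dict.ofList [("Arad", 75), ("Oradea", 71)]),
   ("Timisoara", PySem.Dict.ofList [("Arad", 118), ("Lugoj", 111)]),
   ("Sibiu", PySem.Dict.ofList [("Arad", 140), ("Oradea", 151), ("Fagaras", 99), ("Rimnicu Vilcea", 80)]),
   ("Oradea", PySem.Dict.ofList [("Zerind", 71), ("Sibiu", 151)]),
   ("Lugoj", PySem.Dict.ofList [("Timisoara", 111), ("Mehadia", 70)]),
   ("Fagaras", PySem.Dict.ofList [("Sibiu", 99), ("Bucharest", 211)]),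
   ("Rimnicu Vilcea", PySem.Dict.ofList [("Sibiu", 80), ("Craiova", 146), ("Pitesti", 97)]),
   ("Mehadia", PySem.Dict.ofList [("Lugoj", 70), ("Drobeta", 75)]),
   ("Drobeta", PySem.Dict.ofList [("Mehadia", 75), ("Craiova", 120)]),
   ("Craiova", PySem.Dict.ofList [("Drobeta", 120), ("Rimnicu Vilcea", 146), ("Pitesti", 138)]),
   ("Pitesti", PySem.Dict.ofList [("Rimnicu Vilcea", 97), ("Craiova", 138), ("Bucharest", 101)]),
   ("Bucharest", PySem.Dict.ofList [("Fagaras", 211), ("Pitesti", 101)])]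

def pvHeur : PySem.Dict String Int := PySem.Dict.ofList
  [("Arad", 366), ("Zerind", 374), ("Timisoara", 329), ("Sibiu", 253), ("Oradea", 380),
   ("Lugoj", 244), ("Fagaras", 176), ("Rimnicu Vilcea", 193), ("Mehadia", 241),
   ("Drobeta", 242), ("Craiova", 160), ("Pitesti", 100), ("Bucharest", 0)]

-- romania_map[s]  (empty dict outside Pre_: the Python raises KeyError there)
def pvNbrs (s : String) : PySem.Dict String Int := PySem.Dict.getD pvRomania s (PySem.Dict.ofList [])
-- romania_map[s][x] + heuristics[x]
def pvF (s x : String) : Int := PySem.Dict.getD (pvNbrs s) x 0 + PySem.Dict.getD pvHeur x 0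
-- sorted(romania_map[s], key=lambda x: romania_map[s][x] + heuristics[x])
def pvSuccs (s : String) : List String := PySem.List.sorted (PySem.Dict.keys (pvNbrs s)) (fun x => pvF s x)

-- A's `for city in successors` loop; `rec` is the recursive call on a successor
def pvLoopA (rec : String → List String → Int → Option (List String))
    (s : String) (p : List String) (L : Int) : List String → Option (List String)
  | [] => none
  | city :: cs =>
    let new_path := p ++ [city]
    let f_value := pvF s city
    if f_value ≤ L then
      match rec city new_path (min L f_value) with
      | some result =>
        -- Python's `if result:` — an empty list is falsy
        if result.isEmpty then pvLoopA rec s p L cs else some result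
      | none => pvLoopA rec s p L cs
    else pvLoopA rec s p L cs

-- A's recursion, guarded by fuel (never exhausted: the depth is bounded, see pvMu_le33)
def pvArecF : Nat → String → String → List String → Int → Option (List String)
  | 0, _, _, _, _ => none
  | n + 1, goal, s, p, L =>
    if s = goal then some p
    else pvLoopA (fun city np L' => pvArecF n goal city np L') s p L (pvSuccs s)

def rbfs_search (start : String) (goal : String) (path : List String) (f_limit : Int) : Option (List String) :=
  pvArecF 64 goal start path f_limit

-- ===== PORT B =====
-- B's precomputed table F_ADJ: each city's (distance+heuristic, neighbour) pairs,
-- already sorted ascending by f-value (a literal in Source B, a literal here).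
def pvFAdj : PySem.Dict String (List (Int × String)) := PySem.Dict.ofList
  [("Arad", [(393, "Sibiu"), (447, "Timisoara"), (449, "Zerind")]),
   ("Zerind", [(441, "Arad"), (451, "Oradea")]),
   ("Timisoara", [(355, "Lugoj"), (484, "Arad")]),
   ("Sibiu", [(273, "Rimnicu Vilcea"), (275, "Fagaras"), (506, "Arad"), (531, "Oradea")]),
   ("Oradea", [(404, "Sibiu"), (445, "Zerind")]),
   ("Lugoj", [(311, "Mehadia"), (440, "Timisoara")]),
   ("Fagaras", [(211, "Bucharest"), (352, "Sibiu")]),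
   ("Rimnicu Vilcea", [(197, "Pitesti"), (306, "Craiova"), (333, "Sibiu")]),
   ("Mehadia", [(314, "Lugoj"), (317, "Drobeta")]),
   ("Drobeta", [(280, "Craiova"), (316, "Mehadia")]),
   ("Craiova", [(238, "Pitesti"), (339, "Rimnicu Vilcea"), (362, "Drobeta")]),
   ("Pitesti", [(101, "Bucharest"), (290, "Rimnicu Vilcea"), (298, "Craiova")]),
   ("Bucharest", [(201, "Pitesti"), (387, "Fagaras")])]

-- B's inner `for f, x in reversed(F_ADJ[city])` loop: the Lean list's HEAD is the
-- Python stack's END (its top), so appending the reversed rows is prepending the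
-- eligible successors in sorted order.
def pvPushB (p : List String) (L : Int) (rows : List (Int × String))
    (rest : List (String × List String × Int)) : List (String × List String × Int) :=
  rows.reverse.foldl
    (fun st fx => if fx.1 ≤ L then (fx.2, p ++ [fx.2], min L fx.1) :: st else st) rest

-- B's while loop, guarded by fuel (never exhausted: the number of pops is bounded, see pvEq)
def pvBloopF : Nat → String → List (String × List String × Int) → Option (List String)
  | 0, _, _ => none
  | fuel + 1, goal, stack =>
    match stack with
    | [] => none
    | (city, p, limit) :: rest =>
      if city = goal then some p
      else pvBloopF fuel goal (pvPushB p limit (PySem.Dict.getD pvFAdj city []) rest)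

def rbfs_search_alt (start : String) (goal : String) (path : List String) (f_limit : Int) : Option (List String) :=
  pvBloopF (5 ^ 40) goal [(start, path, f_limit)]

-- ===== PRECONDITION & SPEC =====
-- Pre_ excludes exactly the inputs where Python A raises KeyError: start neither the
-- goal nor a city of the map (B's Python raises the same KeyError there).
def Pre_rbfs_search (start : String) (goal : String) (path : List String) (f_limit : Int) : Prop :=
  start = goal ∨ start ∈ ["Arad", "Zerind", "Timisoara", "Sibiu", "Oradea", "Lugoj", "Fagaras",
    "Rimnicu Vilcea", "Mehadia", "Drobeta", "Craiova", "Pitesti", "Bucharest"]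
instance (start : String) (goal : String) (path : List String) (f_limit : Int) : Decidable (Pre_rbfs_search start goal path f_limit) := by unfold Pre_rbfs_search; infer_instance

def pvWitness_rbfs_search : String × String × List String × Int := ("Arad", "Bucharest", ["Arad"], 2000)

def Spec_rbfs_search (start : String) (goal : String) (path : List String) (f_limit : Int) (out : Option (List String)) : Prop := out = rbfs_search_alt start goal path f_limit
instance (start : String) (goal : String) (path : List String) (f_limit : Int) (out : Option (List String)) : Decidable (Spec_rbfs_search start goal path f_limit out) := by unfold Spec_rbfs_search; infer_instance

-- ===== CLAIM (what is proved, stated in full; the proofs are below) =====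
def Claim_equal_rbfs_search : Prop := ∀ (start : String) (goal : String) (path : List String) (f_limit : Int), Dom_rbfs_search start goal path f_limit → Pre_rbfs_search start goal path f_limit → Spec_rbfs_search start goal path f_limit (rbfs_search start goal path f_limit)

-- ===== LEMMAS AND PROOFS =====

-- the 32 directed edges of the map with f-value w + h (all f-values distinct, no loops)
def pvEdges : List (String × String × Int) :=
  [("Arad", "Zerind", 449), ("Arad", "Timisoara", 447), ("Arad", "Sibiu", 393),
   ("Zerind", "Arad", 441), ("Zerind", "Oradea", 451),
   ("Timisoara", "Arad", 484), ("Timisoara", "Lugoj", 355),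
   ("Sibiu", "Arad", 506), ("Sibiu", "Oradea", 531), ("Sibiu", "Fagaras", 275), ("Sibiu", "Rimnicu Vilcea", 273),
   ("Oradea", "Zerind", 445), ("Oradea", "Sibiu", 404),
   ("Lugoj", "Timisoara", 440), ("Lugoj", "Mehadia", 311),
   ("Fagaras", "Sibiu", 352), ("Fagaras", "Bucharest", 211),
   ("Rimnicu Vilcea", "Sibiu", 333), ("Rimnicu Vilcea", "Craiova", 306), ("Rimnicu Vilcea", "Pitesti", 197),
   ("Mehadia", "Lugoj", 314), ("Mehadia", "Drobeta", 317),
   ("Drobeta", "Mehadia", 316), ("Drobeta", "Craiova", 280),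
   ("Craiova", "Drobeta", 362), ("Craiova", "Rimnicu Vilcea", 339), ("Craiova", "Pitesti", 238),
   ("Pitesti", "Rimnicu Vilcea", 290), ("Pitesti", "Craiova", 298), ("Pitesti", "Bucharest", 101),
   ("Bucharest", "Fagaras", 387), ("Bucharest", "Pitesti", 201)]

-- depth measure: edges with f-value below the limit, plus one if some edge out of s meets it
def pvMu (s : String) (L : Int) : Nat :=
  (pvEdges.filter (fun e => decide (e.2.2 < L))).length +
  (if ∃ e ∈ pvEdges, e.1 = s ∧ e.2.2 = L then 1 else 0)

def pvWt (fr : String × List String × Int) : Nat := 5 ^ (pvMu fr.1 fr.2.2 + 1)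

-- the eligible successor frames, in sorted order (what one pass of B's inner loop pushes)
def pvMkF (s : String) (p : List String) (L : Int) (cs : List String) :
    List (String × List String × Int) :=
  cs.filterMap (fun c => if pvF s c ≤ L then some (c, p ++ [c], min L (pvF s c)) else none)

theorem pvEdges_inj : ∀ e1 ∈ pvEdges, ∀ e2 ∈ pvEdges, e1.2.2 = e2.2.2 → e1 = e2 := by decide

theorem pvEdges_noloop : ∀ e ∈ pvEdges, e.1 ≠ e.2.1 := by decide

theorem pvSuccs_key {s c : String} (h : c ∈ pvSuccs s) : s ∈ PySem.Dict.keys pvRomania := by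
  have hmem : c ∈ PySem.Dict.keys (pvNbrs s) := by
    have := (PySem.List.mem_sorted (xs := PySem.Dict.keys (pvNbrs s)) (key := fun x => pvF s x)
      (rev := false) (x := c)).mp
    exact this h
  by_cases hc : pvRomania.contains s = true
  · exact (PySem.Dict.contains_iff_mem_keys _ _).mp hc
  · exfalso
    have hg : pvRomania.get? s = none :=
      (PySem.Dict.get?_eq_none_iff_contains _ _).mpr (by simpa using hc)
    have hn : pvNbrs s = PySem.Dict.ofList [] := by simp [pvNbrs, PySem.Dict.getD, hg]
    rw [hn] at hmem
    have h0 : PySem.Dict.keys (PySem.Dict.ofList ([] : List (String × Int))) = [] := rfl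
    rw [h0] at hmem
    simp at hmem

theorem pvEdge_mem : ∀ s ∈ PySem.Dict.keys pvRomania, ∀ c ∈ pvSuccs s, (s, c, pvF s c) ∈ pvEdges := by
  decide

theorem pvDeg : ∀ s ∈ PySem.Dict.keys pvRomania, (pvSuccs s).length ≤ 4 := by decide

-- B's table row for a map city is exactly A's sorted successors paired with their f-values
theorem pvFAdj_keys : ∀ s ∈ PySem.Dict.keys pvRomania,
    PySem.Dict.getD pvFAdj s [] = (pvSuccs s).map (fun c => (pvF s c, c)) := by decide

theorem pvFAdj_same_keys : PySem.Dict.keys pvFAdj = PySem.Dict.keys pvRomania := by decide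

theorem pvFAdj_eq (s : String) :
    PySem.Dict.getD pvFAdj s [] = (pvSuccs s).map (fun c => (pvF s c, c)) := by
  by_cases hc : pvRomania.contains s = true
  · exact pvFAdj_keys s ((PySem.Dict.contains_iff_mem_keys _ _).mp hc)
  · have hfc : ¬ pvFAdj.contains s = true := by
      intro h
      have := (PySem.Dict.contains_iff_mem_keys _ _).mp h
      rw [pvFAdj_same_keys] at this
      exact hc ((PySem.Dict.contains_iff_mem_keys _ _).mpr this)
    have hg1 : pvFAdj.get? s = none :=
      (PySem.Dict.get?_eq_none_iff_contains _ _).mpr (by simpa using hfc)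
    have hg2 : pvRomania.get? s = none :=
      (PySem.Dict.get?_eq_none_iff_contains _ _).mpr (by simpa using hc)
    have hn : pvNbrs s = PySem.Dict.ofList [] := by simp [pvNbrs, PySem.Dict.getD, hg2]
    have hsucc : pvSuccs s = [] := by
      unfold pvSuccs
      rw [hn]
      rfl
    rw [hsucc]
    simp [PySem.Dict.getD, hg1]

theorem pvFlen_mono {a b : Int} (hab : a ≤ b) (l : List (String × String × Int)) :
    (l.filter (fun e => decide (e.2.2 < a))).length ≤ (l.filter (fun e => decide (e.2.2 < b))).length := by
  induction l with
  | nil => simp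
  | cons x l ih =>
    simp only [List.filter_cons]
    by_cases h1 : x.2.2 < a
    · have h2 : x.2.2 < b := lt_of_lt_of_le h1 hab
      simp [h1, h2]; omega
    · by_cases h2 : x.2.2 < b <;> simp [h1, h2] <;> omega

theorem pvFlen_strict {a b : Int} (hab : a < b) (l : List (String × String × Int))
    (e : String × String × Int) (he : e ∈ l) (hv : e.2.2 = a) :
    (l.filter (fun e => decide (e.2.2 < a))).length < (l.filter (fun e => decide (e.2.2 < b))).length := by
  induction l with
  | nil => simp at he
  | cons x l ih =>
    simp only [List.filter_cons]
    rcases List.mem_cons.mp he with rfl | hm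
    · have h1 : ¬ e.2.2 < a := by omega
      have h2 : e.2.2 < b := by omega
      simp [h1, h2]
      have := pvFlen_mono (le_of_lt hab) l
      omega
    · have := ih hm
      by_cases h1 : x.2.2 < a
      · have h2 : x.2.2 < b := lt_of_lt_of_le h1 (le_of_lt hab)
        simp [h1, h2]; omega
      · by_cases h2 : x.2.2 < b <;> simp [h1, h2] <;> omega

theorem pvMu_lt {s c : String} {L : Int} (hc : c ∈ pvSuccs s) (hle : pvF s c ≤ L) :
    pvMu c (min L (pvF s c)) < pvMu s L := by
  have hmem : (s, c, pvF s c) ∈ pvEdges := pvEdge_mem s (pvSuccs_key hc) c hc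
  have hsc : s ≠ c := by simpa using pvEdges_noloop _ hmem
  have hmin : min L (pvF s c) = pvF s c := min_eq_right hle
  rw [hmin]
  have hind0 : ¬ ∃ e ∈ pvEdges, e.1 = c ∧ e.2.2 = pvF s c := by
    rintro ⟨e, he, h1, h2⟩
    have he2 : e = (s, c, pvF s c) := pvEdges_inj e he _ hmem h2
    rw [he2] at h1
    exact hsc h1
  unfold pvMu
  rw [if_neg hind0]
  rcases lt_or_eq_of_le hle with hlt | heq
  · have hstrict := pvFlen_strict hlt pvEdges _ hmem rfl
    omega
  · rw [heq]
    have hind1 : ∃ e ∈ pvEdges, e.1 = s ∧ e.2.2 = L := ⟨(s, c, pvF s c), hmem, rfl, heq⟩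
    rw [if_pos hind1]
    omega

theorem pvMu_le33 (s : String) (L : Int) : pvMu s L ≤ 33 := by
  unfold pvMu
  have h1 : (pvEdges.filter (fun e => decide (e.2.2 < L))).length ≤ pvEdges.length :=
    List.length_filter_le _ _
  have h2 : pvEdges.length = 32 := rfl
  split <;> omega

-- B's reverse-fold over the f-paired successor rows builds the sorted eligible frames
theorem pvFoldB_eq (s : String) (p : List String) (L : Int) : ∀ (l : List String)
    (rest : List (String × List String × Int)),
    (l.map (fun c => (pvF s c, c))).reverse.foldl
        (fun st fx => if fx.1 ≤ L then (fx.2, p ++ [fx.2], min L fx.1) :: st else st) rest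
      = pvMkF s p L l ++ rest := by
  intro l
  induction l with
  | nil => intro rest; rfl
  | cons c l ih =>
    intro rest
    rw [List.map_cons, List.reverse_cons, List.foldl_append, ih rest]
    simp only [List.foldl_cons, List.foldl_nil]
    unfold pvMkF
    simp only [List.filterMap_cons]
    by_cases hf : pvF s c ≤ L
    · simp [hf]
    · simp [hf]

theorem pvPushB_eq (s : String) (p : List String) (L : Int) (rest : List (String × List String × Int)) :
    pvPushB p L (PySem.Dict.getD pvFAdj s []) rest = pvMkF s p L (pvSuccs s) ++ rest := by
  unfold pvPushB
  rw [pvFAdj_eq]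
  exact pvFoldB_eq s p L (pvSuccs s) rest

theorem pvSuccs_le4 (s : String) : (pvSuccs s).length ≤ 4 := by
  cases hx : pvSuccs s with
  | nil => simp
  | cons a l =>
    have ha : a ∈ pvSuccs s := by rw [hx]; exact List.mem_cons_self
    have := pvDeg s (pvSuccs_key ha)
    rw [hx] at this
    exact this

theorem pvMkF_wt (s : String) (p : List String) (L : Int) : ∀ (cs : List String),
    (∀ c ∈ cs, c ∈ pvSuccs s) →
    ((pvMkF s p L cs).map pvWt).sum ≤ cs.length * 5 ^ (pvMu s L) := by
  intro cs
  induction cs with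
  | nil => intro _; simp [pvMkF]
  | cons c cs' ih =>
    intro h
    have h2 := ih (fun x hx => h x (List.mem_cons_of_mem _ hx))
    simp only [List.length_cons]
    by_cases hf : pvF s c ≤ L
    · have hmkf : pvMkF s p L (c :: cs') = (c, p ++ [c], min L (pvF s c)) :: pvMkF s p L cs' := by
        unfold pvMkF
        simp [hf]
      rw [hmkf]
      simp only [List.map_cons, List.sum_cons]
      have h1 : pvWt (c, p ++ [c], min L (pvF s c)) ≤ 5 ^ (pvMu s L) := by
        show 5 ^ (pvMu c (min L (pvF s c)) + 1) ≤ 5 ^ (pvMu s L)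
        have := pvMu_lt (h c List.mem_cons_self) hf
        exact Nat.pow_le_pow_right (by norm_num) (by omega)
      exact le_trans (Nat.add_le_add h1 h2) (le_of_eq (by ring))
    · have hmkf : pvMkF s p L (c :: cs') = pvMkF s p L cs' := by
        unfold pvMkF
        simp [hf]
      rw [hmkf]
      exact le_trans h2 (Nat.mul_le_mul_right _ (Nat.le_succ _))

theorem pvStack_wt (s : String) (p : List String) (L : Int) (rest : List (String × List String × Int)) :
    (((pvMkF s p L (pvSuccs s) ++ rest).map pvWt).sum) < pvWt (s, p, L) + ((rest.map pvWt).sum) := by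
  rw [List.map_append, List.sum_append]
  have hb := pvMkF_wt s p L (pvSuccs s) (fun _ hc => hc)
  have hlen := pvSuccs_le4 s
  have hx : (pvSuccs s).length * 5 ^ (pvMu s L) ≤ 4 * 5 ^ (pvMu s L) :=
    Nat.mul_le_mul_right _ hlen
  have hpos : 0 < 5 ^ (pvMu s L) := Nat.pow_pos (by norm_num)
  have hwt : pvWt (s, p, L) = 5 ^ (pvMu s L) * 5 := by
    unfold pvWt
    rw [pow_succ]
  omega

-- one-step unfolding lemmas
theorem pvArecF_succ (n : Nat) (goal s : String) (p : List String) (L : Int) :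
    pvArecF (n + 1) goal s p L = (if s = goal then some p
      else pvLoopA (fun city np L' => pvArecF n goal city np L') s p L (pvSuccs s)) := rfl

theorem pvBloopF_nil (goal : String) : ∀ fuel, pvBloopF fuel goal [] = none := by
  intro fuel
  cases fuel <;> rfl

theorem pvBloopF_cons (goal city : String) (p : List String) (limit : Int)
    (rest : List (String × List String × Int)) {fuel : Nat} (h : 0 < fuel) :
    pvBloopF fuel goal ((city, p, limit) :: rest) =
      if city = goal then some p
      else pvBloopF (fuel - 1) goal (pvPushB p limit (PySem.Dict.getD pvFAdj city []) rest) := by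
  cases fuel with
  | zero => omega
  | succ k => rfl

theorem pvLoopA_congr (f1 f2 : String → List String → Int → Option (List String))
    (s : String) (p : List String) (L : Int) : ∀ (cs : List String),
    (∀ c ∈ cs, pvF s c ≤ L → f1 c (p ++ [c]) (min L (pvF s c)) = f2 c (p ++ [c]) (min L (pvF s c))) →
    pvLoopA f1 s p L cs = pvLoopA f2 s p L cs := by
  intro cs
  induction cs with
  | nil => intro _; rfl
  | cons c cs' ih =>
    intro h
    have hcs' := fun x hx => h x (List.mem_cons_of_mem _ hx)
    simp only [pvLoopA]
    by_cases hf : pvF s c ≤ L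
    · rw [if_pos hf, h c List.mem_cons_self hf, ih hcs', if_pos hf]
    · rw [if_neg hf, ih hcs', if_neg hf]

theorem pvLoopA_ne_nil (f : String → List String → Int → Option (List String))
    (s : String) (p : List String) (L : Int) : ∀ (cs : List String) (r : List String),
    pvLoopA f s p L cs = some r → r ≠ [] := by
  intro cs
  induction cs with
  | nil => intro r h; simp [pvLoopA] at h
  | cons c cs' ih =>
    intro r h
    simp only [pvLoopA] at h
    by_cases hf : pvF s c ≤ L
    · rw [if_pos hf] at h
      cases harec : f c (p ++ [c]) (min L (pvF s c)) with
      | none =>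
        rw [harec] at h
        dsimp only at h
        exact ih r h
      | some result =>
        rw [harec] at h
        dsimp only at h
        by_cases hemp : result.isEmpty
        · rw [if_pos hemp] at h
          exact ih r h
        · rw [if_neg hemp] at h
          cases h
          simpa [List.isEmpty_iff] using hemp
    · rw [if_neg hf] at h
      exact ih r h

theorem pvArecF_mono : ∀ (n : Nat), ∀ (m : Nat) (goal s : String) (p : List String) (L : Int),
    pvMu s L < n → pvMu s L < m → pvArecF n goal s p L = pvArecF m goal s p L := by
  intro n
  induction n using Nat.strong_induction_on with
  | _ n IH =>
  intro m goal s p L hn hm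
  cases n with
  | zero => omega
  | succ n' =>
  cases m with
  | zero => omega
  | succ m' =>
  rw [pvArecF_succ, pvArecF_succ]
  by_cases hg : s = goal
  · rw [if_pos hg, if_pos hg]
  · rw [if_neg hg, if_neg hg]
    apply pvLoopA_congr
    intro c hc hf
    have hmu := pvMu_lt hc hf
    exact IH n' (Nat.lt_succ_self _) m' goal c (p ++ [c]) (min L (pvF s c)) (by omega) (by omega)

theorem pvBloopF_congr (goal : String) : ∀ (f1 f2 : Nat) (stack : List (String × List String × Int)),
    ((stack.map pvWt).sum) < f1 → ((stack.map pvWt).sum) < f2 →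
    pvBloopF f1 goal stack = pvBloopF f2 goal stack := by
  intro f1
  induction f1 using Nat.strong_induction_on with
  | _ f1 IH =>
  intro f2 stack h1 h2
  cases stack with
  | nil => rw [pvBloopF_nil, pvBloopF_nil]
  | cons fr rest =>
    obtain ⟨city, p, limit⟩ := fr
    simp only [List.map_cons, List.sum_cons] at h1 h2
    rw [pvBloopF_cons _ _ _ _ _ (by omega), pvBloopF_cons _ _ _ _ _ (by omega)]
    by_cases hg : city = goal
    · rw [if_pos hg, if_pos hg]
    · rw [if_neg hg, if_neg hg]
      have hw := pvPushB_eq city p limit rest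
      have hw2 := pvStack_wt city p limit rest
      rw [← hw] at hw2
      exact IH (f1 - 1) (by omega) (f2 - 1) _ (by omega) (by omega)

theorem pvMain : ∀ (n : Nat) (goal s : String) (p : List String) (L : Int), pvMu s L ≤ n →
    ∀ (cs : List String), (∀ c ∈ cs, c ∈ pvSuccs s) →
    ∀ (rest : List (String × List String × Int)) (fuel : Nat),
      (((pvMkF s p L cs ++ rest).map pvWt).sum) < fuel →
      pvBloopF fuel goal (pvMkF s p L cs ++ rest) =
        (match pvLoopA (fun city np L' => pvArecF n goal city np L') s p L cs with
         | some r => some r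
         | none => pvBloopF fuel goal rest) := by
  intro n
  induction n using Nat.strong_induction_on with
  | _ n IH =>
  intro goal s p L hmu cs
  induction cs with
  | nil =>
    intro _ rest fuel hW
    simp [pvMkF, pvLoopA]
  | cons c cs' ih =>
    intro hcs rest fuel hW
    have hcs' : ∀ x ∈ cs', x ∈ pvSuccs s := fun x hx => hcs x (List.mem_cons_of_mem _ hx)
    by_cases hf : pvF s c ≤ L
    · have hmuc := pvMu_lt (hcs c List.mem_cons_self) hf
      have hmkf : pvMkF s p L (c :: cs') = (c, p ++ [c], min L (pvF s c)) :: pvMkF s p L cs' := by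
        unfold pvMkF
        simp [hf]
      rw [hmkf] at hW ⊢
      rw [List.cons_append] at hW ⊢
      have hfuel : 0 < fuel := lt_of_le_of_lt (Nat.zero_le _) hW
      rw [pvBloopF_cons _ _ _ _ _ hfuel]
      obtain ⟨n', rfl⟩ : ∃ n', n = n' + 1 := ⟨n - 1, by omega⟩
      have hloop : pvLoopA (fun city np L' => pvArecF (n' + 1) goal city np L') s p L (c :: cs') =
          (match pvArecF (n' + 1) goal c (p ++ [c]) (min L (pvF s c)) with
           | some result =>
             if result.isEmpty then pvLoopA (fun city np L' => pvArecF (n' + 1) goal city np L') s p L cs'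
             else some result
           | none => pvLoopA (fun city np L' => pvArecF (n' + 1) goal city np L') s p L cs') := by
        simp only [pvLoopA]
        rw [if_pos hf]
      rw [hloop]
      simp only [List.map_cons, List.sum_cons] at hW
      have hwpos : 0 < pvWt (c, p ++ [c], min L (pvF s c)) := Nat.pow_pos (by norm_num)
      by_cases hg : c = goal
      · rw [if_pos hg]
        have harec : pvArecF (n' + 1) goal c (p ++ [c]) (min L (pvF s c)) = some (p ++ [c]) := by
          rw [pvArecF_succ, if_pos hg]
        rw [harec]
        have hne : (p ++ [c]).isEmpty = false := by simp
        dsimp only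
        rw [hne]
        simp
      · rw [if_neg hg]
        rw [pvPushB_eq]
        have hwpush := pvStack_wt c (p ++ [c]) (min L (pvF s c)) (pvMkF s p L cs' ++ rest)
        have hIH := IH (pvMu c (min L (pvF s c))) (by omega) goal c (p ++ [c])
          (min L (pvF s c)) (le_refl _) (pvSuccs c) (fun _ h => h)
          (pvMkF s p L cs' ++ rest) (fuel - 1) (by omega)
        rw [hIH]
        have harec : pvArecF (n' + 1) goal c (p ++ [c]) (min L (pvF s c)) =
            pvLoopA (fun city np L' => pvArecF n' goal city np L') c (p ++ [c])
              (min L (pvF s c)) (pvSuccs c) := by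
          rw [pvArecF_succ, if_neg hg]
        rw [harec]
        have hcongr : pvLoopA (fun city np L' => pvArecF (pvMu c (min L (pvF s c))) goal city np L')
              c (p ++ [c]) (min L (pvF s c)) (pvSuccs c)
            = pvLoopA (fun city np L' => pvArecF n' goal city np L') c (p ++ [c])
              (min L (pvF s c)) (pvSuccs c) := by
          apply pvLoopA_congr
          intro d hd hfd
          have := pvMu_lt hd hfd
          exact pvArecF_mono _ _ goal d _ _ (by omega) (by omega)
        rw [hcongr]
        cases hres : pvLoopA (fun city np L' => pvArecF n' goal city np L') c (p ++ [c])
            (min L (pvF s c)) (pvSuccs c) with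
        | some r =>
          have hr : r ≠ [] := pvLoopA_ne_nil _ _ _ _ _ r hres
          have hremp : r.isEmpty = false := by simpa [List.isEmpty_iff] using hr
          dsimp only
          rw [hremp]
          simp
        | none =>
          dsimp only
          have hc2 : pvBloopF (fuel - 1) goal (pvMkF s p L cs' ++ rest) =
              pvBloopF fuel goal (pvMkF s p L cs' ++ rest) := by
            apply pvBloopF_congr <;> omega
          rw [hc2]
          exact ih hcs' rest fuel (by omega)
    · have hmkf : pvMkF s p L (c :: cs') = pvMkF s p L cs' := by
        unfold pvMkF
        simp [hf]
      rw [hmkf] at hW ⊢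
      have hloop : pvLoopA (fun city np L' => pvArecF n goal city np L') s p L (c :: cs') =
          pvLoopA (fun city np L' => pvArecF n goal city np L') s p L cs' := by
        simp only [pvLoopA]
        rw [if_neg hf]
      rw [hloop]
      exact ih hcs' rest fuel hW

theorem pvEq (start goal : String) (path : List String) (f_limit : Int) :
    rbfs_search start goal path f_limit = rbfs_search_alt start goal path f_limit := by
  unfold rbfs_search rbfs_search_alt
  have hfuelpos : 0 < 5 ^ 40 := Nat.pow_pos (by norm_num)
  rw [pvBloopF_cons _ _ _ _ _ hfuelpos]
  rw [show (64 : Nat) = 63 + 1 from rfl, pvArecF_succ]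
  by_cases hg : start = goal
  · rw [if_pos hg, if_pos hg]
  · rw [if_neg hg, if_neg hg, pvPushB_eq]
    have hmu : pvMu start f_limit ≤ 33 := pvMu_le33 _ _
    have hW : (((pvMkF start path f_limit (pvSuccs start) ++
        ([] : List (String × List String × Int))).map pvWt).sum) < 5 ^ 40 - 1 := by
      have h1 := pvStack_wt start path f_limit []
      have h2 : pvWt (start, path, f_limit) ≤ 5 ^ 34 := by
        show 5 ^ (pvMu start f_limit + 1) ≤ 5 ^ 34
        exact Nat.pow_le_pow_right (by norm_num) (by omega)
      have h3 : (5 : Nat) ^ 34 < 5 ^ 40 - 1 := by norm_num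
      simp only [List.map_nil, List.sum_nil] at h1
      omega
    have hmain := pvMain 33 goal start path f_limit hmu (pvSuccs start) (fun _ h => h)
      [] (5 ^ 40 - 1) hW
    rw [hmain]
    have hcongr : pvLoopA (fun city np L' => pvArecF 33 goal city np L') start path f_limit (pvSuccs start)
        = pvLoopA (fun city np L' => pvArecF 63 goal city np L') start path f_limit (pvSuccs start) := by
      apply pvLoopA_congr
      intro d hd hfd
      have := pvMu_lt hd hfd
      exact pvArecF_mono _ _ goal d _ _ (by omega) (by omega)
    rw [hcongr]
    cases hres : pvLoopA (fun city np L' => pvArecF 63 goal city np L') start path f_limit (pvSuccs start) with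
    | some r => simp
    | none => simp [pvBloopF_nil]

-- ===== VERDICT (by name: the statement is the Claim_ definition above) =====
theorem rbfs_search_spec : Claim_equal_rbfs_search := by
  intro start goal path f_limit _ _
  unfold Spec_rbfs_search
  exact pvEq start goal path f_limit
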